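-- pv_equiv track=rewrite | github.com/avjves/HistSE | data_handler/models.py | chart_bucket_range
-- ===== SOURCE A (Python) =====
-- def chart_bucket_range(labels, data, bucket_size):
--     """
--     Generates data for a chart with bucketed data / labels.
--     Buckets are formed from the labels.
--     Assumes labels and data are both sorted timewise AND that their indexes match.
--     """
--     min_key = labels[0]
--     max_key = labels[-1]
--     if min_key == max_key: # No need to bucket stuff when we only have one year in data.
--         return ["{} - {}".format(min_key, max_key)], [sum(data)]
--     bucket_indexes = [(i, i+bucket_size) for i in range(min_key, max_key, bucket_size)]
--     buckets = [[] for _ in bucket_indexes]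
--     cur_bi = 0
--     for i in range(0, len(labels)):
--         while True:
--             if labels[i] <= bucket_indexes[cur_bi][1]:
--                 buckets[cur_bi].append([labels[i], data[i]])
--                 break
--             else:
--                 cur_bi += 1
--                 continue
--
--     new_labels, new_data = [], []
--     for bucket_i, bucket in enumerate(buckets):
--         new_labels.append("{} - {}".format(bucket_indexes[bucket_i][0], bucket_indexes[bucket_i][1]))
--         new_data.append(sum([v[1] for v in bucket]))
--     return new_labels, new_data
-- ===== SOURCE B (Python) =====
-- def chart_bucket_range(labels, data, bucket_size):
--     min_key, max_key = labels[0], labels[-1]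
--     if min_key == max_key:
--         return ["{} - {}".format(min_key, max_key)], [sum(data)]
--     starts = list(range(min_key, max_key, bucket_size))
--     sums = [0] * len(starts)
--     cur = 0
--     for label, value in zip(labels, data):
--         while label > starts[cur] + bucket_size:
--             cur += 1
--         sums[cur] += value
--     return ["{} - {}".format(s, s + bucket_size) for s in starts], sums
-- ===== Notes on version B (the rewrite author's own statement) =====
-- stated objective: simpler
-- what changed: B keeps the monotonic bucket-pointer walk but accumulates per-bucket sums directly in one pass over zip(labels, data), eliminating A's intermediate list-of-lists of [label, data] pairs and its whole second summing pass; the label strings are built by a comprehension at the end.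
import Mathlib
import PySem

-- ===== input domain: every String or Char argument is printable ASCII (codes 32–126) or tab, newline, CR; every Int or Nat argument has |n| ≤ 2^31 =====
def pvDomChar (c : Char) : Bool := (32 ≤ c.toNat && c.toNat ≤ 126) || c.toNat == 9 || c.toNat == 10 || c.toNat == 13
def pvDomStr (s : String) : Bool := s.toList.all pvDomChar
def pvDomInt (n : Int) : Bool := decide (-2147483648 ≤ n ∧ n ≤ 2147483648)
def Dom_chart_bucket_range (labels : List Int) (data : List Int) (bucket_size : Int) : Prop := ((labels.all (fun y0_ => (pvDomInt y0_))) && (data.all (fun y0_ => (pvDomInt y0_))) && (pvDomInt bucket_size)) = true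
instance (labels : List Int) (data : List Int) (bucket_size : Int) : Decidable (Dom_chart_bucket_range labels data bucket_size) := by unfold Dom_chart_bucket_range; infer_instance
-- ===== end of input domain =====

-- B keeps A's monotonic pointer walk but folds the per-bucket sums directly in one pass,
-- dropping A's intermediate list-of-lists and second summing pass (objective: simpler).

-- "{} - {}".format(a, b)
def pvFmt (a b : Int) : String := PySem.Int.toStr a ++ " - " ++ PySem.Int.toStr b

-- ===== PORT A =====
-- A's inner `while True` walk: first j ≥ cur with label ≤ bucket_indexes[j][1]; none = IndexError
def pvPlaceA (bi : List (Int × Int)) (label : Int) : Nat → Nat → Option Nat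
  | 0, _ => none
  | fuel + 1, cur =>
    match bi[cur]? with
    | none => none
    | some p => if label ≤ p.2 then some cur else pvPlaceA bi label fuel (cur + 1)

-- A's `for i in range(0, len(labels))` placement loop; state = (buckets, cur_bi), none = IndexError
def pvLoopA (labels data : List Int) (bi : List (Int × Int)) :
    Nat → Option (List (List (Int × Int)) × Nat) → Option (List (List (Int × Int)) × Nat)
  | i, st =>
    if _h : i < labels.length then
      pvLoopA labels data bi (i + 1)
        (match st with
         | none => none
         | some (buckets, cur) =>
           match PySem.List.pyGet? labels (i : Int), PySem.List.pyGet? data (i : Int) with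
           | some lab, some d =>
             match pvPlaceA bi lab (bi.length + 1 - cur) cur with
             | none => none
             | some j => some (buckets.modify j (fun b => b ++ [(lab, d)]), j)
           | _, _ => none)
    else st
  termination_by i _ => labels.length - i

def chart_bucket_range (labels : List Int) (data : List Int) (bucket_size : Int) : List String × List Int :=
  match PySem.List.pyGet? labels 0, PySem.List.pyGet? labels (-1) with
  | some min_key, some max_key =>
    if min_key == max_key then ([pvFmt min_key max_key], [data.sum])
    else
      let bucket_indexes := (PySem.List.pyRange min_key max_key bucket_size).map (fun i => (i, i + bucket_size))
      match pvLoopA labels data bucket_indexes 0 (some (List.replicate bucket_indexes.length [], 0)) with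
      | some (buckets, _) =>
        (bucket_indexes.zip buckets).foldl
          (fun acc pb => (acc.1 ++ [pvFmt pb.1.1 pb.1.2], acc.2 ++ [(pb.2.map Prod.snd).sum])) ([], [])
      | none => ([], [])
  | _, _ => ([], [])

-- ===== PORT B =====
-- B's inner `while label > starts[cur] + bucket_size` walk; none = IndexError
def pvPlaceB (starts : List Int) (bs label : Int) : Nat → Nat → Option Nat
  | 0, _ => none
  | fuel + 1, cur =>
    match starts[cur]? with
    | none => none
    | some s => if label > s + bs then pvPlaceB starts bs label fuel (cur + 1) else some cur

-- one step of B's `for label, value in zip(labels, data)` loop; state = (sums, cur)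
def pvStepB (starts : List Int) (bs : Int) (st : Option (List Int × Nat)) (p : Int × Int) :
    Option (List Int × Nat) :=
  match st with
  | none => none
  | some (sums, cur) =>
    match pvPlaceB starts bs p.1 (starts.length + 1 - cur) cur with
    | none => none
    | some j => some (sums.modify j (· + p.2), j)

def chart_bucket_range_alt (labels : List Int) (data : List Int) (bucket_size : Int) : List String × List Int :=
  match PySem.List.pyGet? labels 0, PySem.List.pyGet? labels (-1) with
  | some min_key, some max_key =>
    if min_key == max_key then ([pvFmt min_key max_key], [data.sum])
    else
      let starts := PySem.List.pyRange min_key max_key bucket_size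
      match (labels.zip data).foldl (pvStepB starts bucket_size) (some (List.replicate starts.length 0, 0)) with
      | some (sums, _) => (starts.map (fun s => pvFmt s (s + bucket_size)), sums)
      | none => ([], [])
  | _, _ => ([], [])

-- ===== PRECONDITION & SPEC =====
-- Pre_ = exactly the inputs on which Python A returns normally: labels nonempty, and unless
-- labels[0] == labels[-1] we need a positive step, labels[0] < labels[-1] (else range() is empty
-- and the walk raises IndexError), enough data (data[i] is read for every i < len(labels)), and
-- every label within the last bucket's inclusive end (else the pointer walks off: IndexError).
def Pre_chart_bucket_range (labels : List Int) (data : List Int) (bucket_size : Int) : Prop :=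
  labels ≠ [] ∧
  ((PySem.List.pyGet? labels 0).getD 0 = (PySem.List.pyGet? labels (-1)).getD 0 ∨
   (0 < bucket_size ∧
    (PySem.List.pyGet? labels 0).getD 0 < (PySem.List.pyGet? labels (-1)).getD 0 ∧
    labels.length ≤ data.length ∧
    ∀ x ∈ labels, x ≤ (PySem.List.pyGet? labels 0).getD 0 +
      bucket_size * (PySem.Int.floordiv ((PySem.List.pyGet? labels (-1)).getD 0 - (PySem.List.pyGet? labels 0).getD 0 - 1) bucket_size + 1)))

instance (labels : List Int) (data : List Int) (bucket_size : Int) : Decidable (Pre_chart_bucket_range labels data bucket_size) := by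
  unfold Pre_chart_bucket_range; infer_instance

def pvWitness_chart_bucket_range : List Int × List Int × Int := ([1, 2, 5], [10, 20, 30], 2)

def Spec_chart_bucket_range (labels : List Int) (data : List Int) (bucket_size : Int) (out : List String × List Int) : Prop := out = chart_bucket_range_alt labels data bucket_size
instance (labels : List Int) (data : List Int) (bucket_size : Int) (out : List String × List Int) : Decidable (Spec_chart_bucket_range labels data bucket_size out) := by unfold Spec_chart_bucket_range; infer_instance

-- ===== CLAIM (what is proved, stated in full; the proofs are below) =====
def Claim_equal_chart_bucket_range : Prop := ∀ (labels : List Int) (data : List Int) (bucket_size : Int), Dom_chart_bucket_range labels data bucket_size → Pre_chart_bucket_range labels data bucket_size → Spec_chart_bucket_range labels data bucket_size (chart_bucket_range labels data bucket_size)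

-- ===== LEMMAS AND PROOFS =====

-- A's pair-walk is B's start-walk: the pairs are (s, s + bs) and `label ≤ s+bs` ↔ `¬ label > s+bs`
theorem pvPlace_eq (starts : List Int) (bs label : Int) :
    ∀ (fuel cur : Nat),
      pvPlaceA (starts.map (fun s => (s, s + bs))) label fuel cur = pvPlaceB starts bs label fuel cur := by
  intro fuel
  induction fuel with
  | zero => intro cur; simp [pvPlaceA, pvPlaceB]
  | succ f ih =>
    intro cur
    simp only [pvPlaceA, pvPlaceB, List.getElem?_map]
    cases h : starts[cur]? with
    | none => simp
    | some s =>
      simp only [Option.map_some]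
      by_cases hle : label ≤ s + bs
      · simp [hle, not_lt.mpr hle]
      · simp [hle, lt_of_not_ge hle, ih]

-- appending (lab, d) to bucket j, seen through the per-bucket sums
theorem pvModify_map (l : List (List (Int × Int))) :
    ∀ (j : Nat) (lab d : Int),
      (l.modify j (fun b => b ++ [(lab, d)])).map (fun b => (b.map Prod.snd).sum)
        = (l.map (fun b => (b.map Prod.snd).sum)).modify j (· + d) := by
  induction l with
  | nil => intro j lab d; simp
  | cons b bs ih =>
    intro j lab d
    cases j with
    | zero => simp [List.modify]
    | succ j => simp [List.modify_succ_cons, ih j]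


theorem pvLoopA_none (labels data : List Int) (bi : List (Int × Int)) :
    ∀ (i : Nat), pvLoopA labels data bi i none = none := by
  suffices H : ∀ (fuel i : Nat), labels.length - i ≤ fuel → pvLoopA labels data bi i none = none by
    exact fun i => H _ i le_rfl
  intro fuel
  induction fuel with
  | zero =>
    intro i hf
    rw [pvLoopA]
    simp only [dif_neg (by omega : ¬ i < labels.length)]
  | succ f ih =>
    intro i hf
    rw [pvLoopA]
    by_cases hi : i < labels.length
    · simp only [dif_pos hi]
      exact ih (i + 1) (by omega)
    · simp only [dif_neg hi]

theorem pvLoopA_length (labels data : List Int) (bi : List (Int × Int)) :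
    ∀ (i : Nat) (bk : List (List (Int × Int))) (c : Nat) (bk' : List (List (Int × Int))) (c' : Nat),
      pvLoopA labels data bi i (some (bk, c)) = some (bk', c') → bk'.length = bk.length := by
  suffices H : ∀ (fuel i : Nat), labels.length - i ≤ fuel →
      ∀ (bk : List (List (Int × Int))) (c : Nat) (bk' : List (List (Int × Int))) (c' : Nat),
        pvLoopA labels data bi i (some (bk, c)) = some (bk', c') → bk'.length = bk.length by
    exact fun i bk c bk' c' h => H _ i le_rfl bk c bk' c' h
  intro fuel
  induction fuel with
  | zero =>
    intro i hf bk c bk' c' h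
    rw [pvLoopA] at h
    simp only [dif_neg (by omega : ¬ i < labels.length)] at h
    cases h
    rfl
  | succ f ih =>
    intro i hf bk c bk' c' h
    by_cases hi : i < labels.length
    · rw [pvLoopA] at h
      simp only [dif_pos hi] at h
      cases ha : PySem.List.pyGet? labels (i : Int) with
      | none => simp only [ha] at h; rw [pvLoopA_none] at h; cases h
      | some lab =>
        cases hb : PySem.List.pyGet? data (i : Int) with
        | none => simp only [ha, hb] at h; rw [pvLoopA_none] at h; cases h
        | some d =>
          simp only [ha, hb] at h
          cases hp : pvPlaceA bi lab (bi.length + 1 - c) c with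
          | none => simp only [hp] at h; rw [pvLoopA_none] at h; cases h
          | some j =>
            simp only [hp] at h
            have := ih (i + 1) (by omega) _ _ _ _ h
            simpa using this
    · rw [pvLoopA] at h
      simp only [dif_neg hi] at h
      cases h
      rfl

-- main loop invariant: B's fold over the remaining zip is A's loop seen through per-bucket sums
theorem pvLoop_eq (labels data : List Int) (mn bs : Int) (mx : Int)
    (hlen : labels.length ≤ data.length) :
    ∀ (i : Nat) (st : Option (List (List (Int × Int)) × Nat)),
      ((labels.drop i).zip (data.drop i)).foldl (pvStepB (PySem.List.pyRange mn mx bs) bs)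
          (st.map (fun q => (q.1.map (fun b => (b.map Prod.snd).sum), q.2)))
        = (pvLoopA labels data ((PySem.List.pyRange mn mx bs).map (fun s => (s, s + bs))) i st).map
            (fun q => (q.1.map (fun b => (b.map Prod.snd).sum), q.2)) := by
  suffices H : ∀ (fuel i : Nat), labels.length - i ≤ fuel →
      ∀ (st : Option (List (List (Int × Int)) × Nat)),
        ((labels.drop i).zip (data.drop i)).foldl (pvStepB (PySem.List.pyRange mn mx bs) bs)
            (st.map (fun q => (q.1.map (fun b => (b.map Prod.snd).sum), q.2)))
          = (pvLoopA labels data ((PySem.List.pyRange mn mx bs).map (fun s => (s, s + bs))) i st).map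
              (fun q => (q.1.map (fun b => (b.map Prod.snd).sum), q.2)) by
    exact fun i st => H _ i le_rfl st
  intro fuel
  induction fuel with
  | zero =>
    intro i hf st
    rw [pvLoopA.eq_def]
    simp only [dif_neg (by omega : ¬ i < labels.length)]
    rw [show labels.drop i = [] from List.drop_eq_nil_of_le (by omega), show ([] : List Int).zip (data.drop i) = [] from rfl, List.foldl_nil]
  | succ f ih =>
    intro i hf st
    by_cases hi : i < labels.length
    · have hid : i < data.length := lt_of_lt_of_le hi hlen
      rw [pvLoopA.eq_def]
      simp only [dif_pos hi]
      rw [List.drop_eq_getElem_cons hi, List.drop_eq_getElem_cons hid,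
          List.zip_cons_cons, List.foldl_cons]
      rw [← ih (i + 1) (by omega)]
      congr 1
      cases st with
      | none => simp [pvStepB]
      | some q =>
        obtain ⟨bk, c⟩ := q
        have hget_l : PySem.List.pyGet? labels (i : Int) = some labels[i] := by
          simp [PySem.List.pyGet?_natCast, List.getElem?_eq_getElem hi]
        have hget_d : PySem.List.pyGet? data (i : Int) = some data[i] := by
          simp [PySem.List.pyGet?_natCast, List.getElem?_eq_getElem hid]
        have hlenbi : ((PySem.List.pyRange mn mx bs).map (fun s => (s, s + bs))).length
            = (PySem.List.pyRange mn mx bs).length := List.length_map ..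
        simp only [Option.map_some, pvStepB, hget_l, hget_d,
          pvPlace_eq (PySem.List.pyRange mn mx bs) bs, hlenbi]
        cases hp : pvPlaceB (PySem.List.pyRange mn mx bs) bs labels[i]
            ((PySem.List.pyRange mn mx bs).length + 1 - c) c with
        | none => rfl
        | some j => simp [pvModify_map]
    · rw [pvLoopA.eq_def]
      simp only [dif_neg hi]
      rw [show labels.drop i = [] from List.drop_eq_nil_of_le (by omega), show ([] : List Int).zip (data.drop i) = [] from rfl, List.foldl_nil]

-- the two append-loops of A's output pass are the two maps
theorem pvFoldOut (pairs : List ((Int × Int) × List (Int × Int))) :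
    ∀ acc : List String × List Int,
      pairs.foldl (fun acc pb => (acc.1 ++ [pvFmt pb.1.1 pb.1.2], acc.2 ++ [(pb.2.map Prod.snd).sum])) acc
        = (acc.1 ++ pairs.map (fun pb => pvFmt pb.1.1 pb.1.2),
           acc.2 ++ pairs.map (fun pb => (pb.2.map Prod.snd).sum)) := by
  induction pairs with
  | nil => intro acc; simp
  | cons p ps ih => intro acc; simp [ih, List.append_assoc]

-- ===== VERDICT (by name: the statement is the Claim_ definition above) =====
theorem chart_bucket_range_spec : Claim_equal_chart_bucket_range := by
  intro labels data bucket_size _ hpre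
  unfold Spec_chart_bucket_range
  obtain ⟨hne, hpre2⟩ := hpre
  unfold chart_bucket_range chart_bucket_range_alt
  cases h0 : PySem.List.pyGet? labels 0 with
  | none => rfl
  | some mn =>
    cases h1 : PySem.List.pyGet? labels (-1) with
    | none => rfl
    | some mx =>
      by_cases hmm : mn = mx
      · simp [hmm]
      · simp only [beq_iff_eq, if_neg hmm]
        have hlen : labels.length ≤ data.length := by
          rw [h0, h1] at hpre2
          simp only [Option.getD_some] at hpre2
          rcases hpre2 with h | h
          · exact absurd h hmm
          · exact h.2.2.1
        have hlenbi : ((PySem.List.pyRange mn mx bucket_size).map (fun s => (s, s + bucket_size))).length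
            = (PySem.List.pyRange mn mx bucket_size).length := List.length_map ..
        have hkey : (labels.zip data).foldl (pvStepB (PySem.List.pyRange mn mx bucket_size) bucket_size)
            (some (List.replicate (PySem.List.pyRange mn mx bucket_size).length (0 : Int), 0))
            = (pvLoopA labels data ((PySem.List.pyRange mn mx bucket_size).map (fun s => (s, s + bucket_size))) 0
                (some (List.replicate (PySem.List.pyRange mn mx bucket_size).length [], 0))).map
                (fun q => (q.1.map (fun b => (b.map Prod.snd).sum), q.2)) := by
          have h := pvLoop_eq labels data mn bucket_size mx hlen 0
              (some (List.replicate ((PySem.List.pyRange mn mx bucket_size).map (fun s => (s, s + bucket_size))).length [], 0))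
          simp only [List.drop_zero, Option.map_some, List.map_replicate, hlenbi,
            List.map_nil, List.sum_nil] at h
          exact h
        rw [hlenbi]
        cases hA : pvLoopA labels data ((PySem.List.pyRange mn mx bucket_size).map (fun s => (s, s + bucket_size))) 0
            (some (List.replicate (PySem.List.pyRange mn mx bucket_size).length [], 0)) with
        | none =>
          rw [hA] at hkey
          simp only [Option.map_none] at hkey
          simp only [hkey]
        | some q =>
          obtain ⟨buckets, c⟩ := q
          rw [hA] at hkey
          simp only [Option.map_some] at hkey
          simp only [hkey]
          have hblen : buckets.length = (PySem.List.pyRange mn mx bucket_size).length := by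
            have := pvLoopA_length labels data _ 0 _ 0 _ c hA
            rw [this, List.length_replicate]
          rw [pvFoldOut]
          simp only [List.nil_append, Prod.mk.injEq]
          constructor
          · have h1' : (((PySem.List.pyRange mn mx bucket_size).map (fun s => (s, s + bucket_size))).zip buckets).map
                (fun pb => pvFmt pb.1.1 pb.1.2)
              = ((((PySem.List.pyRange mn mx bucket_size).map (fun s => (s, s + bucket_size))).zip buckets).map Prod.fst).map
                (fun p => pvFmt p.1 p.2) := by rw [List.map_map]; rfl
            rw [h1', List.map_fst_zip (by rw [hlenbi, hblen]), List.map_map]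
            rfl
          · have h2' : (((PySem.List.pyRange mn mx bucket_size).map (fun s => (s, s + bucket_size))).zip buckets).map
                (fun pb => (pb.2.map Prod.snd).sum)
              = ((((PySem.List.pyRange mn mx bucket_size).map (fun s => (s, s + bucket_size))).zip buckets).map Prod.snd).map
                (fun b => (b.map Prod.snd).sum) := by rw [List.map_map]; rfl
            rw [h2', List.map_snd_zip (by rw [hlenbi, hblen])]
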